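-- pv_equiv track=rewrite | github.com/fellowapp/mudder-py | mudder/__init__.py | long_add_same_len
-- ===== SOURCE A (Python) =====
-- def long_add_same_len(
--     a: list[int], b: list[int], base: int, remainder: int, denominator: int
-- ) -> tuple[list[int], bool, int, int]:
--     if len(a) != len(b):
--         msg = "a and b should have same length"
--         raise ValueError(msg)
--
--     carry = remainder >= denominator
--     res = b.copy()
--     if carry:
--         remainder -= denominator
--
--     for i, ai in reversed(list(enumerate(a))):
--         result = ai + b[i] + int(carry)
--         carry = result >= base
--         res[i] = result - base if carry else result
--
--     return res, carry, remainder, denominator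
-- ===== SOURCE B (Python) =====
-- def long_add_same_len(a, b, base, remainder, denominator):
--     if len(a) != len(b):
--         raise ValueError("a and b should have same length")
--     carry0 = remainder >= denominator
--     if carry0:
--         remainder -= denominator
--     # Carry-lookahead: each position's raw sum either generates a carry
--     # (s >= base), kills it (s <= base - 2), or propagates it (s == base - 1).
--     s = [x + y for x, y in zip(a, b)]
--     c = [carry0]                      # carries, least-significant end first
--     for si in reversed(s):
--         c.append(c[-1] if si == base - 1 else si >= base)
--     c.reverse()                       # now c[i] = carry out of position i, c[n] = carry0
--     res = [si + nxt - base * cur for si, cur, nxt in zip(s, c, c[1:])]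
--     return res, c[0], remainder, denominator
-- ===== Notes on version B (the rewrite author's own statement) =====
-- stated objective: alternative
-- what changed: Replaces A's single ripple-carry loop (add digit, compare, conditionally subtract, write back) with a carry-lookahead scheme: a pass of raw digit sums, a generate/kill/propagate pass that derives the whole carry chain without performing any addition, and a final zip that computes each output digit arithmetically from its sum and the two adjacent carries.
import Mathlib
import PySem

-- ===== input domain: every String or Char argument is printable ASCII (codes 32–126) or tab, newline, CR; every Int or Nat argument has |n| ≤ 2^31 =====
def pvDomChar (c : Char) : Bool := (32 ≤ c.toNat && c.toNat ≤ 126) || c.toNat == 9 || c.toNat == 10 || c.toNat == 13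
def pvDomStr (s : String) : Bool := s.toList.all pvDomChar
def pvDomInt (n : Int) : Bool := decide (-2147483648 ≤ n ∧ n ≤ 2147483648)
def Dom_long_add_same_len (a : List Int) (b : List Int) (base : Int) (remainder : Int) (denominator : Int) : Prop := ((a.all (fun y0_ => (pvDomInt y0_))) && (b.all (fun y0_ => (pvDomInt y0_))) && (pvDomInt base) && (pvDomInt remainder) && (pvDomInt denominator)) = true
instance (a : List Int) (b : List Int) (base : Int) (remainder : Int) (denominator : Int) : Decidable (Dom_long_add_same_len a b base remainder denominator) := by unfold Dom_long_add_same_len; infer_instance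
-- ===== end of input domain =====

-- B replaces A's ripple-carry loop by a carry-lookahead scheme: raw digit sums,
-- then a generate/kill/propagate pass deriving the whole carry chain without
-- performing any addition, then digits computed arithmetically from adjacent
-- carries (objective: alternative, same cost).

-- ===== PORT A =====
-- loop body of A: i, ai = p; reads b[i] (always in range on admitted inputs, so
-- the IndexError branch of pyGet? is defaulted), writes res[i]
def pvStepA (b : List Int) (base : Int) (st : List Int × Bool) (p : Int × Int) : List Int × Bool :=
  let result := p.2 + ((PySem.List.pyGet? b p.1).getD 0) + (if st.2 then 1 else 0)
  let carry := decide (base ≤ result)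
  (st.1.set p.1.toNat (if carry then result - base else result), carry)

def long_add_same_len (a : List Int) (b : List Int) (base : Int) (remainder : Int) (denominator : Int) : List Int × Bool × Int × Int :=
  if a.length ≠ b.length then ([], false, 0, 0)  -- Python raises ValueError here (outside Pre_)
  else
    let carry := decide (denominator ≤ remainder)
    let remainder := if carry then remainder - denominator else remainder
    let st := ((PySem.List.enumerate a 0).reverse).foldl (pvStepA b base) (b, carry)
    (st.1, st.2, remainder, denominator)

-- ===== PORT B =====
-- carry pass of B: c.append(c[-1] if si == base - 1 else si >= base)
def pvCarryStep (base : Int) (c : List Bool) (si : Int) : List Bool :=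
  c ++ [if si = base - 1 then c.getLastD false else decide (base ≤ si)]

def long_add_same_len_alt (a : List Int) (b : List Int) (base : Int) (remainder : Int) (denominator : Int) : List Int × Bool × Int × Int :=
  if a.length ≠ b.length then ([], false, 0, 0)  -- Python raises ValueError here (outside Pre_)
  else
    let carry0 := decide (denominator ≤ remainder)
    let remainder := if carry0 then remainder - denominator else remainder
    let s := (a.zip b).map (fun p => p.1 + p.2)
    let c := (s.reverse.foldl (pvCarryStep base) [carry0]).reverse
    -- zip(s, c, c[1:]) truncates to len(s); digit = si + nxt - base * cur
    let res := (s.zip (c.zip c.tail)).map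
      (fun p => p.1 + (if p.2.2 then 1 else 0) - base * (if p.2.1 then 1 else 0))
    -- c is never empty (it starts from [carry0]), so c[0] never raises: headD is exact
    (res, c.headD false, remainder, denominator)

-- ===== PRECONDITION & SPEC =====
-- Pre_ excludes exactly the inputs where Python A raises ValueError (unequal lengths)
def Pre_long_add_same_len (a : List Int) (b : List Int) (base : Int) (remainder : Int) (denominator : Int) : Prop := a.length = b.length
instance (a : List Int) (b : List Int) (base : Int) (remainder : Int) (denominator : Int) : Decidable (Pre_long_add_same_len a b base remainder denominator) := by unfold Pre_long_add_same_len; infer_instance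
def pvWitness_long_add_same_len : List Int × List Int × Int × Int × Int := ([1, 9], [3, 4], 10, 5, 3)

def Spec_long_add_same_len (a : List Int) (b : List Int) (base : Int) (remainder : Int) (denominator : Int) (out : List Int × Bool × Int × Int) : Prop := out = long_add_same_len_alt a b base remainder denominator
instance (a : List Int) (b : List Int) (base : Int) (remainder : Int) (denominator : Int) (out : List Int × Bool × Int × Int) : Decidable (Spec_long_add_same_len a b base remainder denominator out) := by unfold Spec_long_add_same_len; infer_instance

-- ===== CLAIM (what is proved, stated in full; the proofs are below) =====
def Claim_equal_long_add_same_len : Prop := ∀ (a : List Int) (b : List Int) (base : Int) (remainder : Int) (denominator : Int), Dom_long_add_same_len a b base remainder denominator → Pre_long_add_same_len a b base remainder denominator → Spec_long_add_same_len a b base remainder denominator (long_add_same_len a b base remainder denominator)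

-- ===== LEMMAS AND PROOFS =====

-- reference for A's loop: LSB-first ripple-carry addition on zipped reversed digits
def pvAddL (base : Int) : List (Int × Int) → Bool → List Int × Bool
  | [], c => ([], c)
  | (x, y) :: rest, c =>
      let s := x + y + (if c then 1 else 0)
      let c1 := decide (base ≤ s)
      let r := pvAddL base rest c1
      ((if c1 then s - base else s) :: r.1, r.2)

-- reference for B: MSB-first structural version on the list of raw sums
def pvAddM (base : Int) : List Int → Bool → List Int × Bool
  | [], c => ([], c)
  | x :: rest, c =>
      let r := pvAddM base rest c
      let s := x + (if r.2 then 1 else 0)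
      let c1 := decide (base ≤ s)
      ((if c1 then s - base else s) :: r.1, c1)

-- MSB-first carry chain via generate/kill/propagate, matching B's fold
def pvNext (base : Int) (x : Int) (c : Bool) : Bool :=
  if x = base - 1 then c else decide (base ≤ x)

def pvChainR (base : Int) : List Int → Bool → List Bool
  | [], c => [c]
  | x :: rest, c =>
      let r := pvChainR base rest c
      pvNext base x (r.headD false) :: r

theorem pvFoldB_eq (base : Int) (s : List Int) (c0 : Bool) :
    s.reverse.foldl (pvCarryStep base) [c0] = (pvChainR base s c0).reverse := by
  induction s with
  | nil => simp [pvChainR]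
  | cons x s' ih =>
      simp only [List.reverse_cons, List.foldl_append, List.foldl_cons, List.foldl_nil, ih]
      simp only [pvCarryStep, pvChainR, pvNext, List.reverse_cons]
      congr 2
      rw [List.getLastD_eq_getLast?, List.getLast?_reverse, ← List.headD_eq_head?]

theorem pvChainR_ne_nil (base : Int) (s : List Int) (c : Bool) : pvChainR base s c ≠ [] := by
  cases s <;> simp [pvChainR]

-- key arithmetic fact of carry-lookahead: the next carry only depends on the
-- incoming carry when the raw sum is exactly base - 1
theorem pvNext_eq (base x : Int) (c : Bool) :
    pvNext base x c = decide (base ≤ x + (if c then 1 else 0)) := by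
  unfold pvNext
  cases c <;> split_ifs with h <;> simp_all <;> try omega

-- B's staged computation equals the MSB-first ripple reference
theorem pvB_main (base : Int) (s : List Int) (c0 : Bool) :
    (s.zip ((pvChainR base s c0).zip (pvChainR base s c0).tail)).map
        (fun p => p.1 + (if p.2.2 then 1 else 0) - base * (if p.2.1 then 1 else 0))
      = (pvAddM base s c0).1
    ∧ (pvChainR base s c0).headD false = (pvAddM base s c0).2 := by
  induction s with
  | nil => simp [pvChainR, pvAddM]
  | cons x s' ih =>
      obtain ⟨ih1, ih2⟩ := ih
      rcases hC : pvChainR base s' c0 with _ | ⟨h, C'⟩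
      · exact absurd hC (pvChainR_ne_nil base s' c0)
      · have hh : h = (pvAddM base s' c0).2 := by simpa [hC] using ih2
        constructor
        · simp only [pvChainR, hC, List.headD_cons, List.tail_cons, List.zip_cons_cons,
            List.map_cons, pvAddM]
          have e : (h :: C').zip C'
              = (pvChainR base s' c0).zip (pvChainR base s' c0).tail := by
            rw [hC]; rfl
          rw [e, ih1]
          congr 1
          rw [pvNext_eq, hh]
          by_cases hb : base ≤ x + (if (pvAddM base s' c0).2 then 1 else 0) <;>
            simp [hb]
        · simp only [pvChainR, hC, List.headD_cons, pvAddM, pvNext_eq, hh]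

-- splitting A's LSB reference over an appended digit
theorem pvAddL_append (base : Int) (l1 l2 : List (Int × Int)) (c : Bool) :
    pvAddL base (l1 ++ l2) c
      = ((pvAddL base l1 c).1 ++ (pvAddL base l2 (pvAddL base l1 c).2).1,
         (pvAddL base l2 (pvAddL base l1 c).2).2) := by
  induction l1 generalizing c with
  | nil => simp [pvAddL]
  | cons p l1' ih =>
      obtain ⟨x, y⟩ := p
      simp [pvAddL, ih]

-- the MSB sums reference is the reverse of the LSB pairs reference
theorem pvAddM_rev (base : Int) (q : List (Int × Int)) (c : Bool) :
    pvAddM base (q.map (fun p => p.1 + p.2)) c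
      = ((pvAddL base q.reverse c).1.reverse, (pvAddL base q.reverse c).2) := by
  induction q with
  | nil => simp [pvAddM, pvAddL]
  | cons p q' ih =>
      obtain ⟨x, y⟩ := p
      simp only [List.map_cons, List.reverse_cons, pvAddM, ih, pvAddL_append]
      simp [pvAddL]

theorem pvZipRev (a b : List Int) (h : a.length = b.length) :
    (a.zip b).reverse = a.reverse.zip b.reverse := by
  induction a generalizing b with
  | nil => cases b <;> simp_all
  | cons x a' ih =>
      cases b with
      | nil => simp_all
      | cons y b' =>
          simp only [List.length_cons, Nat.add_right_cancel_iff] at h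
          rw [List.zip_cons_cons, List.reverse_cons, List.reverse_cons, List.reverse_cons,
            ih b' h, List.zip_append (by simp [h])]
          simp

-- A's fold computes the LSB ripple reference (proved over a general suffix t/u
-- so that the reverse-append induction goes through)
theorem pvFoldA_eq (base : Int) (as bs t u : List Int) (c : Bool) (h : as.length = bs.length) :
    ((PySem.List.enumerate as 0).reverse).foldl (pvStepA (bs ++ t) base) (bs ++ u, c)
      = ((pvAddL base (as.reverse.zip bs.reverse) c).1.reverse ++ u,
         (pvAddL base (as.reverse.zip bs.reverse) c).2) := by
  induction as using List.reverseRecOn generalizing bs t u c with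
  | nil =>
      have hb : bs = [] := List.eq_nil_of_length_eq_zero h.symm
      subst hb; simp [PySem.List.enumerate, pvAddL]
  | append_singleton as' x ih =>
      rcases hbs : bs.reverse with _ | ⟨y, rbs'⟩
      · exfalso
        have : bs = [] := by simpa using congrArg List.reverse hbs
        subst this; simp at h
      · have hb : bs = rbs'.reverse ++ [y] := by
          have := congrArg List.reverse hbs; simpa using this
        subst hb
        have hlen : as'.length = rbs'.reverse.length := by
          simpa using h
        rw [PySem.List.enumerate_append]
        simp only [List.reverse_append, List.reverse_cons]
        simp only [PySem.List.enumerate_cons, PySem.List.enumerate_nil]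
        simp only [List.reverse_cons, List.reverse_nil, List.nil_append, List.cons_append,
          List.foldl_cons]
        have hread : (PySem.List.pyGet? (rbs'.reverse ++ [y] ++ t) ((0 : Int) + ↑as'.length)).getD 0 = y := by
          have : ((0 : Int) + ↑as'.length) = (↑(rbs'.reverse.length) : Int) := by
            rw [hlen]; ring
          rw [this]
          simp [PySem.List.pyGet?, PySem.List.pyIdx?, List.append_assoc]
        have hset : ∀ d : Int, (rbs'.reverse ++ [y] ++ u).set ((0 : Int) + ↑as'.length).toNat d
            = rbs'.reverse ++ d :: u := by
          intro d
          have h2 : ((0 : Int) + ↑as'.length).toNat = rbs'.reverse.length := by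
            simp [hlen]
          rw [h2, List.append_assoc, List.set_append_right _ _ (le_refl _)]
          simp
        simp only [pvStepA, hread, hset]
        rw [show rbs'.reverse ++ [y] ++ t = rbs'.reverse ++ (y :: t) by simp,
          ih rbs'.reverse (y :: t) _ _ hlen]
        simp only [List.reverse_cons, List.zip_cons_cons, pvAddL]
        simp

-- ===== VERDICT (by name: the statement is the Claim_ definition above) =====
theorem long_add_same_len_spec : Claim_equal_long_add_same_len := by
  intro a b base remainder denominator _ hpre
  unfold Spec_long_add_same_len long_add_same_len long_add_same_len_alt
  have hlen : a.length = b.length := hpre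
  simp only [hlen, ne_eq, not_true_eq_false, if_false]
  have hA := pvFoldA_eq base a b [] [] (decide (denominator ≤ remainder)) hlen
  simp only [List.append_nil] at hA
  have hM := pvAddM_rev base (a.zip b) (decide (denominator ≤ remainder))
  rw [pvZipRev a b hlen] at hM
  have hB := pvB_main base ((a.zip b).map (fun p => p.1 + p.2)) (decide (denominator ≤ remainder))
  rw [hM] at hB
  simp only [pvFoldB_eq, List.reverse_reverse]
  rw [hA, hB.1, hB.2]
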